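-- pv_equiv track=rewrite | github.com/an0kv/voiceguard | voiceguard/inference/hf_backend.py | _pick_fake_index
-- ===== SOURCE A (Python) =====
-- def _pick_fake_index(id2label: dict[int, str]) -> int:
--     # Common class names across deepfake / anti-spoofing models.
--     fake_keywords = ("fake", "spoof", "synthetic", "deepfake", "ai", "clone", "tts")
--     real_keywords = ("real", "bonafide", "bona-fide", "human", "genuine")
--
--     for idx, label in id2label.items():
--         l = str(label).lower()
--         if any(k in l for k in fake_keywords):
--             return int(idx)
--
--     real_idx = None
--     for idx, label in id2label.items():
--         l = str(label).lower()
--         if any(k in l for k in real_keywords):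
--             real_idx = int(idx)
--             break
--
--     # If it's a binary head and we found "real", the other class is fake/spoof.
--     if real_idx is not None and len(id2label) == 2:
--         other = [i for i in id2label.keys() if int(i) != int(real_idx)]
--         if other:
--             return int(other[0])
--
--     # Last resort: assume index 0 is "fake/spoof".
--     return 0
-- ===== SOURCE B (Python) =====
-- def _pick_fake_index(id2label: dict[int, str]) -> int:
--     # Single fused pass: return on the first fake-keyword hit, remembering the
--     # first real-keyword hit along the way; then resolve the binary-head fallback.
--     fake_keywords = ("fake", "spoof", "synthetic", "deepfake", "ai", "clone", "tts")
--     real_keywords = ("real", "bonafide", "bona-fide", "human", "genuine")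
--
--     real_idx = None
--     for idx, label in id2label.items():
--         l = str(label).lower()
--         if any(k in l for k in fake_keywords):
--             return int(idx)
--         if real_idx is None and any(k in l for k in real_keywords):
--             real_idx = int(idx)
--
--     if real_idx is not None and len(id2label) == 2:
--         for i in id2label:
--             if int(i) != real_idx:
--                 return int(i)
--
--     return 0
-- ===== Notes on version B (the rewrite author's own statement) =====
-- stated objective: simpler
-- what changed: Replaces A's two separate scans over id2label (fake scan, then real scan) plus a list-comprehension fallback with one fused pass that returns on the first fake hit while recording the first real hit, and a direct loop over keys for the binary-head fallback.
import Mathlib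
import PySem

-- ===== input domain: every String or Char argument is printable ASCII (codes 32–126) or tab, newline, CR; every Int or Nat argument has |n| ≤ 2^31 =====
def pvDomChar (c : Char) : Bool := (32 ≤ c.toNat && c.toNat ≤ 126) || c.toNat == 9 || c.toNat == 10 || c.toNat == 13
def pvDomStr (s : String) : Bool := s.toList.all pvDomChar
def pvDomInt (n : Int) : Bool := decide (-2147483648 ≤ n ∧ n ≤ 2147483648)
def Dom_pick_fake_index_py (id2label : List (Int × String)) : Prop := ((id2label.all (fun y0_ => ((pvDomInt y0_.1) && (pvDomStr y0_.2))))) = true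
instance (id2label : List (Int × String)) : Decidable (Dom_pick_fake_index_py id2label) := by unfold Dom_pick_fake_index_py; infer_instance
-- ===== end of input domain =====

-- B merges A's two scans into one fused pass (return on first fake hit, remember first
-- real hit) and replaces A's list-comprehension fallback by a direct loop over keys.

-- ===== PORT A =====
def fakeKeywordsA : List String := ["fake", "spoof", "synthetic", "deepfake", "ai", "clone", "tts"]
def realKeywordsA : List String := ["real", "bonafide", "bona-fide", "human", "genuine"]

-- first loop of A: return idx on first fake-keyword hit
def findFakeA : List (Int × String) → Option Int
  | [] => none
  | (idx, label) :: rest =>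
      if fakeKeywordsA.any (fun k => PySem.Str.isIn k (PySem.Str.lower label)) then some idx
      else findFakeA rest

-- second loop of A: real_idx = first real-keyword hit (break)
def findRealA : List (Int × String) → Option Int
  | [] => none
  | (idx, label) :: rest =>
      if realKeywordsA.any (fun k => PySem.Str.isIn k (PySem.Str.lower label)) then some idx
      else findRealA rest

def pick_fake_index_py (id2label : List (Int × String)) : Int :=
  match findFakeA id2label with
  | some i => i
  | none =>
      match findRealA id2label with
      | some r =>
          if id2label.length = 2 then
            -- other = [i for i in id2label.keys() if int(i) != int(real_idx)]
            match (id2label.map Prod.fst).filter (fun i => i ≠ r) with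
            | o :: _ => o
            | [] => 0
          else 0
      | none => 0

-- ===== PORT B =====
def fakeKeywordsB : List String := ["fake", "spoof", "synthetic", "deepfake", "ai", "clone", "tts"]
def realKeywordsB : List String := ["real", "bonafide", "bona-fide", "human", "genuine"]

-- B's single fused loop: .inl i = early return of a fake index, .inr r = loop finished with real_idx = r
def loopB : List (Int × String) → Option Int → Sum Int (Option Int)
  | [], r => Sum.inr r
  | (idx, label) :: rest, r =>
      let l := PySem.Str.lower label
      if fakeKeywordsB.any (fun k => PySem.Str.isIn k l) then Sum.inl idx
      else loopB rest
        (if r.isNone && realKeywordsB.any (fun k => PySem.Str.isIn k l) then some idx else r)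

-- B's fallback loop: first key different from real_idx
def findOtherB (r : Int) : List (Int × String) → Option Int
  | [] => none
  | (i, _) :: rest => if i ≠ r then some i else findOtherB r rest

def pick_fake_index_py_alt (id2label : List (Int × String)) : Int :=
  match loopB id2label none with
  | Sum.inl i => i
  | Sum.inr (some r) =>
      if id2label.length = 2 then (findOtherB r id2label).getD 0 else 0
  | Sum.inr none => 0

-- ===== PRECONDITION & SPEC =====
def Spec_pick_fake_index_py (id2label : List (Int × String)) (out : Int) : Prop := out = pick_fake_index_py_alt id2label
instance (id2label : List (Int × String)) (out : Int) : Decidable (Spec_pick_fake_index_py id2label out) := by unfold Spec_pick_fake_index_py; infer_instance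

-- ===== CLAIM (what is proved, stated in full; the proofs are below) =====
def Claim_equal_pick_fake_index_py : Prop := ∀ (id2label : List (Int × String)), Dom_pick_fake_index_py id2label → Spec_pick_fake_index_py id2label (pick_fake_index_py id2label)

-- ===== LEMMAS AND PROOFS =====

-- B's fused loop decomposes into A's two scans (the real test is only consulted
-- on elements where the fake test failed, which is all of them when no fake matched).
theorem loopB_eq (xs : List (Int × String)) (r : Option Int) :
    loopB xs r = match findFakeA xs with
      | some i => Sum.inl i
      | none => Sum.inr (match r with | some _ => r | none => findRealA xs) := by
  induction xs generalizing r with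
  | nil => cases r <;> rfl
  | cons h t ih =>
    obtain ⟨idx, label⟩ := h
    simp only [loopB, findFakeA, findRealA, fakeKeywordsA, fakeKeywordsB,
      realKeywordsA, realKeywordsB]
    by_cases hf : (["fake", "spoof", "synthetic", "deepfake", "ai", "clone", "tts"]).any
        (fun k => PySem.Str.isIn k (PySem.Str.lower label)) = true
    · rw [if_pos hf, if_pos hf]
    · rw [if_neg hf, if_neg hf]
      cases r with
      | some v =>
        simp only [Option.isNone_some, Bool.false_and, if_neg (Bool.false_ne_true)]
        rw [ih]
      | none =>
        simp only [Option.isNone_none, Bool.true_and]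
        by_cases hr : (["real", "bonafide", "bona-fide", "human", "genuine"]).any
            (fun k => PySem.Str.isIn k (PySem.Str.lower label)) = true
        · rw [if_pos hr, if_pos hr, ih]
        · rw [if_neg hr, if_neg hr, ih]

-- B's fallback loop is the head of A's filtered key list.
theorem findOtherB_eq (r : Int) (xs : List (Int × String)) :
    findOtherB r xs = ((xs.map Prod.fst).filter (fun i => i ≠ r)).head? := by
  induction xs with
  | nil => rfl
  | cons h t ih =>
    obtain ⟨i, s⟩ := h
    by_cases hi : i ≠ r
    · simp [findOtherB, hi]
    · simp [findOtherB, hi, ih]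

-- ===== VERDICT (by name: the statement is the Claim_ definition above) =====
theorem pick_fake_index_py_spec : Claim_equal_pick_fake_index_py := by
  intro xs _
  unfold Spec_pick_fake_index_py pick_fake_index_py pick_fake_index_py_alt
  rw [loopB_eq]
  cases hF : findFakeA xs with
  | some i => rfl
  | none =>
    cases hR : findRealA xs with
    | some r =>
      simp only []
      split_ifs with hl
      · rw [findOtherB_eq]
        simp only [ne_eq, decide_not]
        cases hh : (xs.map Prod.fst).filter (fun i => !decide (i = r)) with
        | nil => simp [hh]
        | cons o l' => simp [hh]
      · rfl
    | none => rfl
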